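-- pv_equiv track=rewrite | github.com/robice1/COSC262 | lab2.py | dumbo_func
-- ===== SOURCE A (Python) =====
-- def dumbo_func(data, start_index = 0):
--     """Takes a list of numbers and does weird stuff with it"""
--     if len(data) <= start_index:
--         return 0
--     else:
--         if (data[start_index] // 100) % 3 != 0:
--             return 1 + dumbo_func(data, start_index + 1)
--         else:
--             return dumbo_func(data, start_index + 1)
-- ===== SOURCE B (Python) =====
-- def dumbo_func(data, start_index=0):
--     """Takes a list of numbers and does weird stuff with it"""
--     count = 0
--     for i in range(start_index, len(data)):
--         if (data[i] // 100) % 3 != 0: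
--             count += 1
--     return count
-- ===== Notes on version B (the rewrite author's own statement) =====
-- stated objective: idiomatic
-- what changed: Replaced the tail recursion with an incremented start_index by a single iterative for-loop over range(start_index, len(data)) with a counter.
import Mathlib
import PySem

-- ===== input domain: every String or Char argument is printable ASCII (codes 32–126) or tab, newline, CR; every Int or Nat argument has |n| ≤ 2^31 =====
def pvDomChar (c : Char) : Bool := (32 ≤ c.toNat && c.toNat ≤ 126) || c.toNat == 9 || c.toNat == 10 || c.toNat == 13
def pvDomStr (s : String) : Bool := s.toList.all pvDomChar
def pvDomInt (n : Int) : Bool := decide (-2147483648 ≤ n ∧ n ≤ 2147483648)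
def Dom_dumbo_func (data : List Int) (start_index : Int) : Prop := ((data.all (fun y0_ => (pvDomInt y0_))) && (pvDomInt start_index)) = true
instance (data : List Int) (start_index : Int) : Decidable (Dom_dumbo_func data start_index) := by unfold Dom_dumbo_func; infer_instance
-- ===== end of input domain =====

-- B replaces A's tail recursion by one iterative pass (a fold over range(start_index, len)) with a counter; objective: idiomatic.

-- ===== PORT A =====
-- literal port of A's recursion on start_index (data[start_index] via pyGetD; the
-- IndexError case, start_index < -len(data) with start_index < len, is excluded by Pre_)
def dumbo_func (data : List Int) (start_index : Int) : Int :=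
  if (data.length : Int) ≤ start_index then 0
  else
    if PySem.Int.mod (PySem.Int.floordiv (PySem.List.pyGetD data start_index 0) 100) 3 ≠ 0 then
      1 + dumbo_func data (start_index + 1)
    else
      dumbo_func data (start_index + 1)
termination_by ((data.length : Int) - start_index).toNat
decreasing_by all_goals omega

-- ===== PORT B =====
-- literal port of B: for i in range(start_index, len(data)): count += 1 if test
def dumbo_func_alt (data : List Int) (start_index : Int) : Int :=
  (PySem.List.pyRange start_index (data.length : Int) 1).foldl
    (fun count i =>
      if PySem.Int.mod (PySem.Int.floordiv (PySem.List.pyGetD data i 0) 100) 3 ≠ 0 then count + 1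
      else count) 0

-- ===== PRECONDITION & SPEC =====
-- Pre_ excludes exactly the inputs where Python A raises IndexError
-- (start_index < -len(data) while start_index < len(data)); B raises there too.
def Pre_dumbo_func (data : List Int) (start_index : Int) : Prop :=
  -(data.length : Int) ≤ start_index ∨ (data.length : Int) ≤ start_index
instance (data : List Int) (start_index : Int) : Decidable (Pre_dumbo_func data start_index) := by
  unfold Pre_dumbo_func; infer_instance
def pvWitness_dumbo_func : List Int × Int := ([150, 300, -42], 0)

def Spec_dumbo_func (data : List Int) (start_index : Int) (out : Int) : Prop := out = dumbo_func_alt data start_index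
instance (data : List Int) (start_index : Int) (out : Int) : Decidable (Spec_dumbo_func data start_index out) := by unfold Spec_dumbo_func; infer_instance

-- ===== CLAIM (what is proved, stated in full; the proofs are below) =====
def Claim_equal_dumbo_func : Prop := ∀ (data : List Int) (start_index : Int), Dom_dumbo_func data start_index → Pre_dumbo_func data start_index → Spec_dumbo_func data start_index (dumbo_func data start_index)

-- ===== LEMMAS AND PROOFS =====

-- pulling the accumulator out of B's counting fold
theorem foldl_count_acc (data : List Int) (l : List Int) (c : Int) :
    l.foldl (fun count i => if PySem.Int.mod (PySem.Int.floordiv (PySem.List.pyGetD data i 0) 100) 3 ≠ 0 then count + 1 else count) c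
      = c + l.foldl (fun count i => if PySem.Int.mod (PySem.Int.floordiv (PySem.List.pyGetD data i 0) 100) 3 ≠ 0 then count + 1 else count) 0 := by
  induction l generalizing c with
  | nil => simp
  | cons x xs ih =>
    simp only [List.foldl_cons]
    rw [ih, ih (if PySem.Int.mod (PySem.Int.floordiv (PySem.List.pyGetD data x 0) 100) 3 ≠ 0 then (0:Int) + 1 else 0)]
    split <;> ring

theorem dumbo_main (data : List Int) : ∀ (n : Nat) (s : Int),
    ((data.length : Int) - s).toNat ≤ n → dumbo_func data s = dumbo_func_alt data s := by
  intro n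
  induction n with
  | zero =>
    intro s hs
    have hle : (data.length : Int) ≤ s := by omega
    rw [dumbo_func, dumbo_func_alt, if_pos hle]
    have : PySem.List.pyRange s (data.length : Int) 1 = [] := by
      simp [PySem.List.pyRange_one, show ((data.length : Int) - s).toNat = 0 by omega]
    rw [this]; rfl
  | succ n ih =>
    intro s hs
    by_cases hle : (data.length : Int) ≤ s
    · rw [dumbo_func, dumbo_func_alt, if_pos hle]
      have : PySem.List.pyRange s (data.length : Int) 1 = [] := by
        simp [PySem.List.pyRange_one, show ((data.length : Int) - s).toNat = 0 by omega]
      rw [this]; rfl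
    · have hlt : s < (data.length : Int) := by omega
      rw [dumbo_func, if_neg hle]
      unfold dumbo_func_alt
      rw [PySem.List.pyRange_one_cons hlt, List.foldl_cons, foldl_count_acc]
      have hrec : dumbo_func data (s + 1) = dumbo_func_alt data (s + 1) := ih (s + 1) (by omega)
      unfold dumbo_func_alt at hrec
      split
      · rw [hrec]; ring
      · rw [hrec]; ring

-- ===== VERDICT (by name: the statement is the Claim_ definition above) =====
theorem dumbo_func_spec : Claim_equal_dumbo_func := by
  intro data s _ _
  unfold Spec_dumbo_func
  exact dumbo_main data ((data.length : Int) - s).toNat s le_rfl
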